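-- pv_equiv track=rewrite | github.com/janoskonig/shadematch_python | app/gamification.py | _xp_level
-- ===== SOURCE A (Python) =====
-- LEVEL_THRESHOLDS = [
--     0,      200,    500,    1000,   2000,   4000,   8000,   16000,  32000,  64000,
--     96000,  128000, 160000, 200000, 240000, 280000, 320000, 360000, 400000, 440000,
--     480000, 520000, 560000, 600000, 640000, 680000, 720000, 760000, 800000, 840000,
-- ]
--
-- def _xp_level(xp: int) -> int:
--     """XP → level index (1..LEVEL_COUNT). Used only for legacy XP bar display."""
--     level = 1
--     for i, threshold in enumerate(LEVEL_THRESHOLDS):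
--         if xp >= threshold:
--             level = i + 1
--         else:
--             break
--     return min(level, len(LEVEL_THRESHOLDS))
-- ===== SOURCE B (Python) =====
-- LEVEL_THRESHOLDS = [
--     0,      200,    500,    1000,   2000,   4000,   8000,   16000,  32000,  64000,
--     96000,  128000, 160000, 200000, 240000, 280000, 320000, 360000, 400000, 440000,
--     480000, 520000, 560000, 600000, 640000, 680000, 720000, 760000, 800000, 840000,
-- ]
--
-- def _xp_level(xp: int) -> int:
--     """XP -> level index via binary search over the sorted threshold table."""
--     lo, hi = 0, len(LEVEL_THRESHOLDS)
--     while lo < hi: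
--         mid = (lo + hi) // 2
--         if xp < LEVEL_THRESHOLDS[mid]:
--             hi = mid
--         else:
--             lo = mid + 1
--     return min(max(1, lo), len(LEVEL_THRESHOLDS))
-- ===== Notes on version B (the rewrite author's own statement) =====
-- stated objective: alternative
-- what changed: Replaced the linear break-scan over the threshold table with a binary search (bisect_right-style lo/hi loop) whose result is clamped with max(1,.)/min(.,len).
import Mathlib
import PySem

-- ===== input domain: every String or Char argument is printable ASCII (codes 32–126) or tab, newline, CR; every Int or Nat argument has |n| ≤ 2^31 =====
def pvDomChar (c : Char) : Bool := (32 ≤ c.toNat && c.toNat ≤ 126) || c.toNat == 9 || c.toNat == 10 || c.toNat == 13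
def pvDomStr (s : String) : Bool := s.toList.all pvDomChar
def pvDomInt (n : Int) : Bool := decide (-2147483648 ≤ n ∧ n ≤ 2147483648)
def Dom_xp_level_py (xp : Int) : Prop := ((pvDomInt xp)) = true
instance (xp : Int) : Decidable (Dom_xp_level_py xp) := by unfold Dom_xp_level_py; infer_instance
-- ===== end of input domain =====

-- B replaces A's linear break-scan over the threshold table with a binary search (lo/hi halving loop); same result, alternative algorithm.


def pvThresholds : List Int := [0, 200, 500, 1000, 2000, 4000, 8000, 16000, 32000, 64000,
  96000, 128000, 160000, 200000, 240000, 280000, 320000, 360000, 400000, 440000,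
  480000, 520000, 560000, 600000, 640000, 680000, 720000, 760000, 800000, 840000]

-- ===== PORT A =====
-- A's for-loop with break, carrying (remaining thresholds, enumerate index i, xp, level)
def pvLoopA : List Int → Nat → Int → Int → Int
  | [], _, _, level => level
  | t :: ts, i, xp, level => if xp ≥ t then pvLoopA ts (i + 1) xp ((i : Int) + 1) else level

def xp_level_py (xp : Int) : Int :=
  min (pvLoopA pvThresholds 0 xp 1) (pvThresholds.length : Int)

-- ===== PORT B =====
-- B's while-loop: fuel = hi - lo is a totality guard only (each iteration shrinks hi - lo);
-- mid is always in [lo, hi) ⊆ range, so getD is exact for Python's LEVEL_THRESHOLDS[mid]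
def pvBrFuel : Nat → List Int → Int → Nat → Nat → Nat
  | 0, _, _, lo, _ => lo
  | fuel + 1, xs, xp, lo, hi =>
    if lo < hi then
      if xp < xs.getD ((lo + hi) / 2) 0 then pvBrFuel fuel xs xp lo ((lo + hi) / 2)
      else pvBrFuel fuel xs xp ((lo + hi) / 2 + 1) hi
    else lo

def pvBr (xs : List Int) (xp : Int) (lo hi : Nat) : Nat := pvBrFuel (hi - lo) xs xp lo hi

def xp_level_py_alt (xp : Int) : Int :=
  min (max 1 ((pvBr pvThresholds xp 0 pvThresholds.length : Nat) : Int)) (pvThresholds.length : Int)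

-- ===== PRECONDITION & SPEC =====
def Spec_xp_level_py (xp : Int) (out : Int) : Prop := out = xp_level_py_alt xp
instance (xp : Int) (out : Int) : Decidable (Spec_xp_level_py xp out) := by unfold Spec_xp_level_py; infer_instance

-- ===== CLAIM (what is proved, stated in full; the proofs are below) =====
def Claim_equal_xp_level_py : Prop := ∀ (xp : Int), Dom_xp_level_py xp → Spec_xp_level_py xp (xp_level_py xp)

-- ===== LEMMAS AND PROOFS =====

-- A's break-scan over a ≤-sorted list computes: level stays if no threshold passes, else i + (number of thresholds ≤ xp)
theorem pvLoopA_spec (ts : List Int) (i : Nat) (xp level : Int)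
    (hs : ts.Pairwise (· ≤ ·)) :
    pvLoopA ts i xp level =
      if ts.countP (fun t => decide (t ≤ xp)) = 0 then level
      else (i : Int) + ts.countP (fun t => decide (t ≤ xp)) := by
  induction ts generalizing i level with
  | nil => simp [pvLoopA]
  | cons t ts ih =>
    rcases List.pairwise_cons.mp hs with ⟨hhead, htail⟩
    by_cases h : t ≤ xp
    · rw [pvLoopA, if_pos h, ih _ _ htail]
      simp only [List.countP_cons, h, decide_true]
      by_cases hz : ts.countP (fun t => decide (t ≤ xp)) = 0
      · simp [hz]
      · simp [hz]
        push_cast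
        ring
    · have hz : (t :: ts).countP (fun t => decide (t ≤ xp)) = 0 := by
        refine List.countP_eq_zero.mpr ?_
        intro x hx
        rcases List.mem_cons.mp hx with rfl | hx
        · simpa using h
        · have := hhead x hx; simp; omega
      rw [pvLoopA, if_neg (by simpa using h), hz]
      simp

-- B's binary search returns lo + (number of indices in [lo, hi) whose entry is ≤ xp), for a sorted table
theorem pvBrFuel_spec (fuel : Nat) (xs : List Int) (xp : Int) :
    ∀ lo hi : Nat, hi - lo ≤ fuel → hi ≤ xs.length →
    (∀ j, j < xs.length → ∀ i, i ≤ j → xs.getD i 0 ≤ xs.getD j 0) →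
    pvBrFuel fuel xs xp lo hi
      = lo + (List.range' lo (hi - lo)).countP (fun i => decide (xs.getD i 0 ≤ xp)) := by
  induction fuel with
  | zero =>
    intro lo hi hf _ _
    have : hi - lo = 0 := Nat.le_zero.mp hf
    simp [pvBrFuel, this]
  | succ fuel ih =>
    intro lo hi hf hlen hmono
    by_cases hlh : lo < hi
    · have hm1 : lo ≤ (lo + hi) / 2 := by omega
      have hm2 : (lo + hi) / 2 < hi := by omega
      have hsplit1 : List.range' lo (hi - lo)
          = List.range' lo ((lo + hi) / 2 - lo) ++ List.range' ((lo + hi) / 2) (hi - (lo + hi) / 2) := by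
        have h2 := List.range'_append (s := lo) (m := (lo + hi) / 2 - lo)
          (n := hi - (lo + hi) / 2) (step := 1)
        rw [show lo + 1 * ((lo + hi) / 2 - lo) = (lo + hi) / 2 from by omega,
          show (lo + hi) / 2 - lo + (hi - (lo + hi) / 2) = hi - lo from by omega] at h2
        exact h2.symm
      by_cases hc : xp < xs.getD ((lo + hi) / 2) 0
      · rw [pvBrFuel, if_pos hlh, if_pos hc,
          ih lo ((lo + hi) / 2) (by omega) (by omega) hmono]
        have hz : (List.range' ((lo + hi) / 2) (hi - (lo + hi) / 2)).countP
            (fun i => decide (xs.getD i 0 ≤ xp)) = 0 := by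
          refine List.countP_eq_zero.mpr ?_
          intro j hj
          rcases List.mem_range'_1.mp hj with ⟨hj1, hj2⟩
          have hjlen : j < xs.length := by omega
          have := hmono j hjlen ((lo + hi) / 2) hj1
          simp only [decide_eq_true_eq]
          omega
        rw [hsplit1, List.countP_append, hz]
        omega
      · rw [pvBrFuel, if_pos hlh, if_neg hc,
          ih ((lo + hi) / 2 + 1) hi (by omega) hlen hmono]
        have hsplit2 : List.range' lo (hi - lo)
            = List.range' lo ((lo + hi) / 2 + 1 - lo)
              ++ List.range' ((lo + hi) / 2 + 1) (hi - ((lo + hi) / 2 + 1)) := by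
          have h2 := List.range'_append (s := lo) (m := (lo + hi) / 2 + 1 - lo)
            (n := hi - ((lo + hi) / 2 + 1)) (step := 1)
          rw [show lo + 1 * ((lo + hi) / 2 + 1 - lo) = (lo + hi) / 2 + 1 from by omega,
            show (lo + hi) / 2 + 1 - lo + (hi - ((lo + hi) / 2 + 1)) = hi - lo from by omega] at h2
          exact h2.symm
        have hall : (List.range' lo ((lo + hi) / 2 + 1 - lo)).countP
            (fun i => decide (xs.getD i 0 ≤ xp)) = ((lo + hi) / 2 + 1 - lo) := by
          have h1 : ∀ j ∈ List.range' lo ((lo + hi) / 2 + 1 - lo),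
              (fun i => decide (xs.getD i 0 ≤ xp)) j = true := by
            intro j hj
            rcases List.mem_range'_1.mp hj with ⟨_, hj2⟩
            have hjm : j ≤ (lo + hi) / 2 := by omega
            have := hmono ((lo + hi) / 2) (by omega) j hjm
            simp only [decide_eq_true_eq]
            omega
          rw [List.countP_eq_length.mpr h1, List.length_range']
        rw [hsplit2, List.countP_append, hall]
        omega
    · have : hi - lo = 0 := by omega
      rw [pvBrFuel, if_neg hlh]
      simp [this]

-- counting indices with a true entry equals counting entries
theorem pvCount_range (xs : List Int) (p : Int → Bool) :
    (List.range xs.length).countP (fun i => p (xs.getD i 0)) = xs.countP p := by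
  induction xs with
  | nil => simp
  | cons t ts ih =>
    rw [List.length_cons, List.range_succ_eq_map, List.countP_cons, List.countP_map,
      List.countP_cons]
    simp only [Function.comp_def, List.getD_cons_zero, List.getD_cons_succ, ih]

-- ===== VERDICT (by name: the statement is the Claim_ definition above) =====
theorem xp_level_py_spec : Claim_equal_xp_level_py := by
  intro xp _
  unfold Spec_xp_level_py xp_level_py xp_level_py_alt pvBr
  have hs : pvThresholds.Pairwise (· ≤ ·) := by decide
  have hmono : ∀ j, j < pvThresholds.length → ∀ i, i ≤ j →
      pvThresholds.getD i 0 ≤ pvThresholds.getD j 0 := by decide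
  rw [pvLoopA_spec pvThresholds 0 xp 1 hs,
    pvBrFuel_spec (pvThresholds.length - 0) pvThresholds xp 0 pvThresholds.length
      (le_refl _) (le_refl _) hmono]
  rw [Nat.sub_zero, ← List.range_eq_range', pvCount_range pvThresholds (fun t => decide (t ≤ xp))]
  by_cases hz : pvThresholds.countP (fun t => decide (t ≤ xp)) = 0
  · simp [hz]
  · simp [hz]
    omega
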